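-- pv_equiv track=rewrite | github.com/kari-coffee/BIO | bio2021q1.py | is_pat
-- ===== SOURCE A (Python) =====
-- def is_pat(s):
--     if len(s) == 1:
--         return True
--     for i in range(1, len(s)):
--         c, d = s[:i], s[i:]
--         #if sorted(list(c))[0] > sorted(list(d))[-1]:
--         if min(c) > max(d):
--             if is_pat(c[::-1]) and is_pat(d[::-1]):
--                 return True
--     return False
-- ===== SOURCE B (Python) =====
-- def is_pat(s):
--     memo = {}
--
--     def solve(t):
--         r = memo.get(t)
--         if r is not None:
--             return r
--         n = len(t)
--         if n == 1:
--             res = True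
--         elif n == 0:
--             res = False
--         else:
--             res = False
--             pmin = t[0]
--             for i in range(1, n):
--                 if pmin > max(t[i:]) and solve(t[:i][::-1]) and solve(t[i:][::-1]):
--                     res = True
--                     break
--                 if t[i] < pmin:
--                     pmin = t[i]
--         memo[t] = res
--         return res
--
--     return solve(s)
-- ===== Notes on version B (the rewrite author's own statement) =====
-- stated objective: alternative
-- what changed: B memoizes the recursion in a dict keyed by the substring (each distinct substring is solved once) and keeps a running prefix minimum across the split loop instead of recomputing min(s[:i]) for every split; A re-solves identical subproblems and rescans the prefix each iteration.
import Mathlib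
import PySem

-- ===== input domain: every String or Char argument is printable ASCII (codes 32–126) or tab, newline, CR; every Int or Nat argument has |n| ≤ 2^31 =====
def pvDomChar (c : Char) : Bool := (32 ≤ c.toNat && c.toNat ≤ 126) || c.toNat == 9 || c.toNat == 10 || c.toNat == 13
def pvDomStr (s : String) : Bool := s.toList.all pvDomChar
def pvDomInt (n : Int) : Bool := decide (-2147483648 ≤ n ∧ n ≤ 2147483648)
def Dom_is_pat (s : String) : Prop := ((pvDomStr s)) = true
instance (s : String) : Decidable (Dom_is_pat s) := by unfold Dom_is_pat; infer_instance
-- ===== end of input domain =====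

-- B replaces A's naive recursion by a memoized solver (dict keyed by the substring)
-- with a running prefix minimum instead of recomputing min(s[:i]) at every split.

-- ===== PORT A =====
-- helper: A's body on the character list of the string (s[:i] / s[i:] are slices,
-- s[::-1] is exact reversal — PySem.List.slice?_none_none_neg_one — and min/max over
-- a nonempty string are PySem.List.min?/max?, which never hit `none` here)
def isPatA (cs : List Char) : Bool :=
  if cs.length == 1 then true
  else
    (PySem.List.pyRange 1 (cs.length : Int) 1).attach.any (fun i =>
      let c := PySem.List.slice cs none (some i.1)
      let d := PySem.List.slice cs (some i.1) none
      match PySem.List.min? c (fun x => x), PySem.List.max? d (fun x => x) with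
      | some m, some M =>
        if M < m then isPatA c.reverse && isPatA d.reverse else false
      | _, _ => false)
termination_by cs.length
decreasing_by
  · have h := PySem.List.mem_pyRange_one.mp i.2
    show (PySem.List.slice cs none (some (i.1 : Int))).reverse.length < cs.length
    rw [PySem.List.slice_to cs (by omega : (0:Int) ≤ i.1)]
    simp only [List.length_reverse, List.length_take]
    omega
  · have h := PySem.List.mem_pyRange_one.mp i.2
    show (PySem.List.slice cs (some (i.1 : Int)) none).reverse.length < cs.length
    rw [PySem.List.slice_from cs (by omega : (0:Int) ≤ i.1)]
    simp only [List.length_reverse, List.length_drop]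
    omega

def is_pat (s : String) : Bool := isPatA s.toList

-- ===== PORT B =====
-- B-side helper: pmin update 't[i] if t[i] < pmin else pmin' (i is in range here)
def updMin (t : List Char) (i : Int) (pmin : Char) : Char :=
  let x := PySem.List.pyGetD t i 'a'
  if x < pmin then x else pmin

-- memoized solver: memo maps an already-solved substring to its answer
def solveB (t : List Char) (memo : PySem.Dict (List Char) Bool) :
    Bool × PySem.Dict (List Char) Bool :=
  match PySem.Dict.get? memo t with
  | some r => (r, memo)
  | none =>
    let p :=
      if t.length == 1 then (true, memo)
      else if t.length == 0 then (false, memo)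
      else
        let st := (PySem.List.pyRange 1 (t.length : Int) 1).attach.foldl
          (fun st i =>
            if st.1 then st  -- loop already 'broke'
            else
              let d := PySem.List.slice t (some i.1) none
              match PySem.List.max? d (fun x => x) with
              | some M =>
                if M < st.2.1 then
                  let r1 := solveB (PySem.List.slice t none (some i.1)).reverse st.2.2
                  if r1.1 then
                    let r2 := solveB d.reverse r1.2
                    if r2.1 then (true, st.2.1, r2.2)
                    else (false, updMin t i.1 st.2.1, r2.2)
                  else (false, updMin t i.1 st.2.1, r1.2)
                else (false, updMin t i.1 st.2.1, st.2.2)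
              | none => (false, updMin t i.1 st.2.1, st.2.2))
          (false, PySem.List.pyGetD t 0 'a', memo)
        (st.1, st.2.2)
    (p.1, PySem.Dict.insert p.2 t p.1)
termination_by t.length
decreasing_by
  · have h := PySem.List.mem_pyRange_one.mp i.2
    show (PySem.List.slice t none (some (i.1 : Int))).reverse.length < t.length
    rw [PySem.List.slice_to t (by omega : (0:Int) ≤ i.1)]
    simp only [List.length_reverse, List.length_take]
    omega
  · have h := PySem.List.mem_pyRange_one.mp i.2
    show (PySem.List.slice t (some (i.1 : Int)) none).reverse.length < t.length
    rw [PySem.List.slice_from t (by omega : (0:Int) ≤ i.1)]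
    simp only [List.length_reverse, List.length_drop]
    omega

def is_pat_alt (s : String) : Bool := (solveB s.toList PySem.Dict.empty).1

-- ===== PRECONDITION & SPEC =====
def Spec_is_pat (s : String) (out : Bool) : Prop := out = is_pat_alt s
instance (s : String) (out : Bool) : Decidable (Spec_is_pat s out) := by unfold Spec_is_pat; infer_instance

-- ===== CLAIM (what is proved, stated in full; the proofs are below) =====
def Claim_equal_is_pat : Prop := ∀ (s : String), Dom_is_pat s → Spec_is_pat s (is_pat s)

-- ===== LEMMAS AND PROOFS =====

-- A's per-split test, named (identical to the body of isPatA's any)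
def okA (t : List Char) (i : Int) : Bool :=
  let c := PySem.List.slice t none (some i)
  let d := PySem.List.slice t (some i) none
  match PySem.List.min? c (fun x => x), PySem.List.max? d (fun x => x) with
  | some m, some M =>
    if M < m then isPatA c.reverse && isPatA d.reverse else false
  | _, _ => false

-- B's loop body, named (identical to the lambda folded in solveB)
def stepB (t : List Char) (st : Bool × Char × PySem.Dict (List Char) Bool) (i : Int) :
    Bool × Char × PySem.Dict (List Char) Bool :=
  if st.1 then st
  else
    let d := PySem.List.slice t (some i) none
    match PySem.List.max? d (fun x => x) with
    | some M =>
      if M < st.2.1 then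
        let r1 := solveB (PySem.List.slice t none (some i)).reverse st.2.2
        if r1.1 then
          let r2 := solveB d.reverse r1.2
          if r2.1 then (true, st.2.1, r2.2)
          else (false, updMin t i st.2.1, r2.2)
        else (false, updMin t i st.2.1, r1.2)
      else (false, updMin t i st.2.1, st.2.2)
    | none => (false, updMin t i st.2.1, st.2.2)

-- minimum of the first j characters (j ≥ 1), as B's running pmin computes it
def pmins (t : List Char) (j : Nat) : Char :=
  match t.take j with
  | [] => 'a'
  | x :: r => r.foldl min x

-- memo-table invariant: every stored answer is A's answer
def MemoInv (memo : PySem.Dict (List Char) Bool) : Prop :=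
  ∀ k r, PySem.Dict.get? memo k = some r → r = isPatA k

lemma attach_foldl_eq {α β : Type} (l : List α) (g : β → α → β) (G : β → {x // x ∈ l} → β)
    (init : β) (hG : ∀ st x, G st x = g st x.1) :
    l.attach.foldl G init = l.foldl g init := by
  have hfun : G = fun st x => g st x.1 := funext fun st => funext fun x => hG st x
  rw [hfun]; exact List.foldl_attach

lemma attach_any_eq {α : Type} (l : List α) (p : α → Bool) (P : {x // x ∈ l} → Bool)
    (hP : ∀ x, P x = p x.1) :
    l.attach.any P = l.any p := by
  have hfun : P = fun x => p x.1 := funext fun x => hP x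
  rw [hfun]; simp [List.any_eq]

lemma isPatA_eq (t : List Char) :
    isPatA t = if t.length == 1 then true
      else (PySem.List.pyRange 1 (t.length : Int) 1).any (okA t) := by
  rw [isPatA]
  rcases h : (t.length == 1) with _ | _
  · simp only [Bool.false_eq_true, if_false]
    rw [attach_any_eq _ (okA t)]
    intro x
    simp only [okA]
  · simp

lemma solveB_eq (t : List Char) (memo : PySem.Dict (List Char) Bool) :
    solveB t memo =
      match PySem.Dict.get? memo t with
      | some r => (r, memo)
      | none =>
        let p :=
          if t.length == 1 then (true, memo)
          else if t.length == 0 then (false, memo)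
          else
            let st := (PySem.List.pyRange 1 (t.length : Int) 1).foldl (stepB t)
              (false, PySem.List.pyGetD t 0 'a', memo)
            (st.1, st.2.2)
        (p.1, PySem.Dict.insert p.2 t p.1) := by
  rw [solveB]
  rcases hg : PySem.Dict.get? memo t with _ | r
  · simp only []
    rw [attach_foldl_eq _ (stepB t)]
    intro st x
    simp only [stepB]
  · simp only []

lemma foldl_stepB_frozen (t : List Char) (L : List Int) (pm : Char)
    (m : PySem.Dict (List Char) Bool) :
    L.foldl (stepB t) (true, pm, m) = (true, pm, m) := by
  induction L with
  | nil => rfl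
  | cons x xs ih => simpa [stepB] using ih

lemma MemoInv_insert {m : PySem.Dict (List Char) Bool} (hm : MemoInv m) (k : List Char) (r : Bool)
    (hr : r = isPatA k) : MemoInv (PySem.Dict.insert m k r) := by
  intro k' r' h
  rw [PySem.Dict.get?_insert] at h
  split at h
  · cases h; subst ‹k' = k›; exact hr
  · exact hm k' r' h

lemma min?_take (t : List Char) (j : Nat) (h1 : 1 ≤ j) (h2 : j ≤ t.length) :
    PySem.List.min? (t.take j) (fun y => y) = some (pmins t j) := by
  rcases ht : t.take j with _ | ⟨x, r⟩
  · rw [List.take_eq_nil_iff] at ht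
    rcases ht with h | h
    · omega
    · subst h; simp at h2; omega
  · rw [PySem.List.min?_id_cons]
    simp [pmins, ht]

lemma pmins_succ (t : List Char) (j : Nat) (h1 : 1 ≤ j) (h2 : j < t.length) :
    pmins t (j + 1) = updMin t (j : Int) (pmins t j) := by
  have htake : t.take (j+1) = t.take j ++ [t[j]] := by
    rw [List.take_add_one]
    simp [List.getElem?_eq_getElem h2]
  rcases ht : t.take j with _ | ⟨x, r⟩
  · rw [List.take_eq_nil_iff] at ht
    rcases ht with h | h
    · omega
    · subst h; simp at h2
  · have hget : PySem.List.pyGetD t (j : Int) 'a' = t[j] := by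
      rw [PySem.List.pyGetD_natCast]
      exact List.getD_eq_getElem _ _ h2
    unfold pmins updMin
    rw [htake, ht]
    simp only [List.cons_append, List.foldl_append, List.foldl_cons, List.foldl_nil, hget]
    rcases lt_or_ge (t[j]) (r.foldl min x) with h | h
    · simp [min_eq_right h.le, h]
    · simp [min_eq_left h, not_lt.mpr h]

lemma pmins_one (t : List Char) (h : 1 ≤ t.length) :
    pmins t 1 = PySem.List.pyGetD t 0 'a' := by
  cases t with
  | nil => simp at h
  | cons x r => simp [pmins, PySem.List.pyGetD_zero]

lemma loopB_inv (t : List Char) (_hlen : 2 ≤ t.length)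
    (IH : ∀ u : List Char, u.length < t.length → ∀ m, MemoInv m →
      (solveB u m).1 = isPatA u ∧ MemoInv (solveB u m).2) :
    ∀ (k j : Nat), t.length - j = k → 1 ≤ j → j ≤ t.length →
      ∀ memo, MemoInv memo →
      ((PySem.List.pyRange (j : Int) (t.length : Int) 1).foldl (stepB t)
          (false, pmins t j, memo)).1
        = (PySem.List.pyRange (j : Int) (t.length : Int) 1).any (okA t) ∧
      MemoInv ((PySem.List.pyRange (j : Int) (t.length : Int) 1).foldl (stepB t)
          (false, pmins t j, memo)).2.2 := by
  intro k
  induction k with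
  | zero =>
    intro j hk h1 hj memo hm
    have hj' : (t.length : Int) ≤ (j : Int) := by omega
    rw [PySem.List.pyRange_one_eq_nil hj']
    exact ⟨rfl, hm⟩
  | succ k ihk =>
    intro j hk h1 hj memo hm
    have hlt : (j : Int) < (t.length : Int) := by omega
    rw [PySem.List.pyRange_one_cons hlt]
    simp only [List.foldl_cons, List.any_cons]
    have hd : PySem.List.slice t (some (j:Int)) none = t.drop j := PySem.List.slice_from_natCast t j
    have hc : PySem.List.slice t none (some (j:Int)) = t.take j := PySem.List.slice_to_natCast t j
    have hdne : t.drop j ≠ [] := by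
      simp only [ne_eq, List.drop_eq_nil_iff]
      omega
    obtain ⟨M, hM⟩ : ∃ M, PySem.List.max? (t.drop j) (fun x => x) = some M := by
      rcases hh : PySem.List.max? (t.drop j) (fun x => x) with _ | M
      · rw [PySem.List.max?_eq_none_iff] at hh; exact absurd hh hdne
      · exact ⟨M, rfl⟩
    have hokA : okA t (j:Int)
        = (if M < pmins t j then isPatA (t.take j).reverse && isPatA (t.drop j).reverse
           else false) := by
      simp only [okA, hc, hd, min?_take t j h1 (by omega), hM]
    have hcast : ((j:Int)+1) = (((j+1 : Nat)):Int) := by push_cast; ring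
    have hlen1 : (t.take j).reverse.length < t.length := by
      simp only [List.length_reverse, List.length_take]; omega
    have hlen2 : (t.drop j).reverse.length < t.length := by
      simp only [List.length_reverse, List.length_drop]; omega
    by_cases hMlt : M < pmins t j
    · obtain ⟨hr1, hminv1⟩ := IH _ hlen1 memo hm
      by_cases hb1 : (solveB (t.take j).reverse memo).1 = true
      · obtain ⟨hr2, hminv2⟩ := IH _ hlen2 _ hminv1
        by_cases hb2 : (solveB (t.drop j).reverse (solveB (t.take j).reverse memo).2).1 = true
        · have hstep : stepB t (false, pmins t j, memo) (j:Int)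
              = (true, pmins t j, (solveB (t.drop j).reverse (solveB (t.take j).reverse memo).2).2) := by
            simp only [stepB, hd, hM, hc]
            simp [hMlt, hb1, hb2]
          rw [hstep, foldl_stepB_frozen]
          have hok : okA t (j:Int) = true := by
            rw [hokA, if_pos hMlt, ← hr1, ← hr2, hb1, hb2]
            rfl
          exact ⟨by simp [hok], hminv2⟩
        · have hstep : stepB t (false, pmins t j, memo) (j:Int)
              = (false, updMin t (j:Int) (pmins t j),
                 (solveB (t.drop j).reverse (solveB (t.take j).reverse memo).2).2) := by
            simp only [stepB, hd, hM, hc]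
            simp [hMlt, hb1, hb2]
          rw [hstep, ← pmins_succ t j h1 (by omega), hcast]
          obtain ⟨hfold, hfinv⟩ := ihk (j+1) (by omega) (by omega) (by omega) _ hminv2
          refine ⟨?_, hfinv⟩
          rw [hfold]
          have hok : okA t (j:Int) = false := by
            rw [hokA, if_pos hMlt, ← hr1, ← hr2]
            simp [hb2]
          simp [hok]
      · have hstep : stepB t (false, pmins t j, memo) (j:Int)
            = (false, updMin t (j:Int) (pmins t j), (solveB (t.take j).reverse memo).2) := by
          simp only [stepB, hd, hM, hc]
          simp [hMlt, hb1]
        rw [hstep, ← pmins_succ t j h1 (by omega), hcast]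
        obtain ⟨hfold, hfinv⟩ := ihk (j+1) (by omega) (by omega) (by omega) _ hminv1
        refine ⟨?_, hfinv⟩
        rw [hfold]
        have hok : okA t (j:Int) = false := by
          rw [hokA, if_pos hMlt, ← hr1]
          simp [hb1]
        simp [hok]
    · have hstep : stepB t (false, pmins t j, memo) (j:Int)
          = (false, updMin t (j:Int) (pmins t j), memo) := by
        simp only [stepB, hd, hM, hc]
        simp [hMlt]
      rw [hstep, ← pmins_succ t j h1 (by omega), hcast]
      obtain ⟨hfold, hfinv⟩ := ihk (j+1) (by omega) (by omega) (by omega) _ hm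
      refine ⟨?_, hfinv⟩
      rw [hfold]
      have hok : okA t (j:Int) = false := by
        rw [hokA, if_neg hMlt]
      simp [hok]

lemma solveB_correct : ∀ (t : List Char) (memo : PySem.Dict (List Char) Bool), MemoInv memo →
    (solveB t memo).1 = isPatA t ∧ MemoInv (solveB t memo).2 := by
  have main : ∀ (n : Nat) (t : List Char), t.length = n →
      ∀ memo, MemoInv memo →
      (solveB t memo).1 = isPatA t ∧ MemoInv (solveB t memo).2 := by
    intro n
    induction n using Nat.strong_induction_on with
    | _ n IHn =>
      intro t hn memo hm
      have IH : ∀ u : List Char, u.length < t.length → ∀ m, MemoInv m →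
          (solveB u m).1 = isPatA u ∧ MemoInv (solveB u m).2 := by
        intro u hu m hmm
        exact IHn u.length (by omega) u rfl m hmm
      rw [solveB_eq]
      rcases hg : PySem.Dict.get? memo t with _ | r
      · simp only []
        by_cases h1 : t.length = 1
        · have hA : isPatA t = true := by rw [isPatA_eq]; simp [h1]
          simp only [h1]
          refine ⟨by simp [hA], ?_⟩
          simp only [beq_self_eq_true, if_true]
          exact MemoInv_insert hm t true hA.symm
        · by_cases h0 : t.length = 0
          · have hA : isPatA t = false := by
              rw [isPatA_eq, h0]
              rw [PySem.List.pyRange_one_eq_nil (by norm_num)]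
              simp
            simp only [h0]
            refine ⟨by simp [hA], ?_⟩
            simp
            exact MemoInv_insert hm t false hA.symm
          · have hlen : 2 ≤ t.length := by omega
            have hloop := loopB_inv t hlen IH (t.length - 1) 1 (by omega) (by omega)
              (by omega) memo hm
            rw [pmins_one t (by omega)] at hloop
            have hA : isPatA t
                = (PySem.List.pyRange 1 (t.length : Int) 1).any (okA t) := by
              rw [isPatA_eq]
              simp [h1]
            have hcast1 : (((1:Nat)):Int) = (1:Int) := by norm_num
            rw [hcast1] at hloop
            have hne1 : (t.length == 1) = false := by simp [h1]
            have hne0 : (t.length == 0) = false := by simp [h0]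
            simp only [hne1, hne0, Bool.false_eq_true, if_false]
            refine ⟨?_, ?_⟩
            · simp only [hA]
              exact hloop.1
            · exact MemoInv_insert hloop.2 t _ (by rw [hloop.1, hA])
      · simp only []
        exact ⟨hm t r hg, hm⟩
  intro t memo hm
  exact main t.length t rfl memo hm

-- ===== VERDICT (by name: the statement is the Claim_ definition above) =====
theorem is_pat_spec : Claim_equal_is_pat := by
  intro s _
  unfold Spec_is_pat is_pat is_pat_alt
  have h := solveB_correct s.toList PySem.Dict.empty
    (by intro k r hk; rw [PySem.Dict.get?_empty] at hk; cases hk)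
  exact h.1.symm
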